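-- pv_equiv track=rewrite | github.com/Aleksandrazt/TextGenerator | main.py | create_chain_for_trigram
-- ===== SOURCE A (Python) =====
-- ENDING = '!.?'
--
-- def create_chain_for_trigram(t_list):
--     chain = dict()
--     for triple in t_list:
--         if triple[0][-1] not in ENDING:
--             head = triple[0] + ' ' + triple[1]
--             if head not in chain.keys():
--                 chain[head] = [triple[2]]
--             else:
--                 chain[head].append(triple[2])
--     return chain
-- ===== SOURCE B (Python) =====
-- ENDING = '!.?'
--
-- def create_chain_for_trigram(t_list):
--     pairs = [(t[0] + ' ' + t[1], t[2]) for t in t_list if t[0][-1] not in ENDING]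
--     heads = dict.fromkeys(h for h, _ in pairs)
--     return {h: [w for h2, w in pairs if h2 == h] for h in heads}
-- ===== Notes on version B (the rewrite author's own statement) =====
-- stated objective: alternative
-- what changed: Instead of incrementally growing a dict while scanning the triples, B first extracts the filtered (head, word) pair list, dedups the heads with dict.fromkeys, and builds each head's word list by a grouped comprehension over the pair list.
import Mathlib
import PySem

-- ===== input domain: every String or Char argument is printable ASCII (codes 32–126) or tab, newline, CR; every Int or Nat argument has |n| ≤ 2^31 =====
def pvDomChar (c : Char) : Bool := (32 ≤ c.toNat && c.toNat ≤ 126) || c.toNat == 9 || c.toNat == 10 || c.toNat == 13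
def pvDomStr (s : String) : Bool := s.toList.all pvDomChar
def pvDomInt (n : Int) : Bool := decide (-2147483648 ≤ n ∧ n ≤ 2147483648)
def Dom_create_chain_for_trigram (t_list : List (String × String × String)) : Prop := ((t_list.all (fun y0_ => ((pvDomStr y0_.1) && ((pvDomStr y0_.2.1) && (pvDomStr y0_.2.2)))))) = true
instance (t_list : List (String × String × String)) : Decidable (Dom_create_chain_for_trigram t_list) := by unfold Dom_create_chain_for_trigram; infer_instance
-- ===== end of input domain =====

-- B builds the chain by a grouped pass (filtered pair list, deduped heads, per-head comprehension)
-- instead of A's incremental dict accumulation; alternative decomposition, not claimed faster.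

-- ===== PORT A =====
def pvEnding : List Char := ['!', '.', '?']

-- one iteration of A's for-loop; on an empty first word Python raises IndexError (excluded by Pre_), the port returns the chain unchanged there
def pvStepA (chain : List (String × List String)) (triple : String × String × String) :
    List (String × List String) :=
  match PySem.Str.pyGet? triple.1 (-1) with
  | none => chain
  | some c =>
    if pvEnding.contains c then chain
    else
      let head := triple.1 ++ " " ++ triple.2.1
      if (chain.map Prod.fst).contains head then
        chain.map (fun kv => if kv.1 == head then (kv.1, kv.2 ++ [triple.2.2]) else kv)
      else
        chain ++ [(head, [triple.2.2])]

def create_chain_for_trigram (t_list : List (String × String × String)) : List (String × List String) :=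
  t_list.foldl pvStepA []

-- ===== PORT B =====
-- the filtered (head, third-word) pair list of Source B
def pvKeep (t : String × String × String) : Option (String × String) :=
  match PySem.Str.pyGet? t.1 (-1) with
  | none => none
  | some c => if pvEnding.contains c then none else some (t.1 ++ " " ++ t.2.1, t.2.2)

def pvPairs (t_list : List (String × String × String)) : List (String × String) :=
  t_list.filterMap pvKeep

-- '[w for h2, w in pairs if h2 == h]'
def pvWordsOf (ps : List (String × String)) (h : String) : List String :=
  (ps.filter (fun p => p.1 == h)).map Prod.snd

def create_chain_for_trigram_alt (t_list : List (String × String × String)) : List (String × List String) :=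
  let ps := pvPairs t_list
  (PySem.List.dedup (ps.map Prod.fst)).map (fun h => (h, pvWordsOf ps h))

-- ===== PRECONDITION & SPEC =====
-- Pre_ excludes exactly the inputs with a triple whose first component is '' — there Python A raises IndexError (triple[0][-1])
def Pre_create_chain_for_trigram (t_list : List (String × String × String)) : Prop :=
  ∀ t ∈ t_list, t.1 ≠ ""
instance (t_list : List (String × String × String)) : Decidable (Pre_create_chain_for_trigram t_list) := by
  unfold Pre_create_chain_for_trigram; infer_instance

def pvWitness_create_chain_for_trigram : (List (String × String × String)) :=
  [("the", "cat", "sat"), ("cat.", "x", "y"), ("the", "cat", "ran")]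

def Spec_create_chain_for_trigram (t_list : List (String × String × String)) (out : List (String × List String)) : Prop := out = create_chain_for_trigram_alt t_list
instance (t_list : List (String × String × String)) (out : List (String × List String)) : Decidable (Spec_create_chain_for_trigram t_list out) := by unfold Spec_create_chain_for_trigram; infer_instance

-- ===== CLAIM (what is proved, stated in full; the proofs are below) =====
def Claim_equal_create_chain_for_trigram : Prop := ∀ (t_list : List (String × String × String)), Dom_create_chain_for_trigram t_list → Pre_create_chain_for_trigram t_list → Spec_create_chain_for_trigram t_list (create_chain_for_trigram t_list)

-- ===== LEMMAS AND PROOFS =====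

-- proof-side view of B's result over an arbitrary pair list
def pvGroup (ps : List (String × String)) : List (String × List String) :=
  (PySem.List.dedup (ps.map Prod.fst)).map (fun h => (h, pvWordsOf ps h))

-- proof-side view of one step of A, acting on an already-extracted pair
def pvAdd (chain : List (String × List String)) (p : String × String) : List (String × List String) :=
  if (chain.map Prod.fst).contains p.1 then
    chain.map (fun kv => if kv.1 == p.1 then (kv.1, kv.2 ++ [p.2]) else kv)
  else
    chain ++ [(p.1, [p.2])]

theorem pvStepA_eq (chain : List (String × List String)) (t : String × String × String) :
    pvStepA chain t = match pvKeep t with | none => chain | some p => pvAdd chain p := by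
  unfold pvStepA pvKeep pvAdd
  cases PySem.Str.pyGet? t.1 (-1) with
  | none => rfl
  | some c => by_cases h : c ∈ pvEnding <;> simp [h]

theorem foldl_stepA (t_list : List (String × String × String)) (chain : List (String × List String)) :
    t_list.foldl pvStepA chain = (pvPairs t_list).foldl pvAdd chain := by
  induction t_list generalizing chain with
  | nil => rfl
  | cons t ts ih =>
    simp only [List.foldl_cons, pvPairs, List.filterMap_cons, pvStepA_eq]
    cases pvKeep t with
    | none => exact ih chain
    | some p => simp only [List.foldl_cons]; exact ih _

theorem ofList_append_singleton {α : Type} [BEq α] [LawfulBEq α] (l : List α) (x : α) :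
    PySem.Set.ofList (l ++ [x]) =
      if x ∈ l then PySem.Set.ofList l else PySem.Set.ofList l ++ [x] := by
  have h1 : PySem.Set.ofList (l ++ [x]) = PySem.Set.add (PySem.Set.ofList l) x := by
    rw [PySem.Set.ofList_eq_foldl, PySem.Set.ofList_eq_foldl, List.foldl_append,
      List.foldl_cons, List.foldl_nil]
  rw [h1]
  show (if (PySem.Set.ofList l).contains x = true then _ else _) = _
  by_cases h : x ∈ l
  · rw [if_pos h, if_pos]
    exact List.contains_iff_mem.mpr ((PySem.Set.mem_ofList l x).mpr h)
  · rw [if_neg h, if_neg]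
    intro hc
    exact h ((PySem.Set.mem_ofList l x).mp (List.contains_iff_mem.mp hc))

theorem map_fst_pvGroup (ps : List (String × String)) :
    (pvGroup ps).map Prod.fst = PySem.Set.ofList (ps.map Prod.fst) := by
  unfold pvGroup
  rw [PySem.List.dedup_eq_ofList, List.map_map]
  exact List.map_id _

theorem pvWordsOf_append_singleton (ps : List (String × String)) (p : String × String) (h : String) :
    pvWordsOf (ps ++ [p]) h = pvWordsOf ps h ++ (if p.1 = h then [p.2] else []) := by
  unfold pvWordsOf
  rw [List.filter_append]
  by_cases hp : p.1 = h <;> simp [hp]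

theorem pvAdd_pvGroup (ps : List (String × String)) (p : String × String) :
    pvAdd (pvGroup ps) p = pvGroup (ps ++ [p]) := by
  unfold pvAdd
  rw [map_fst_pvGroup]
  by_cases hmem : p.1 ∈ ps.map Prod.fst
  · have hc : (PySem.Set.ofList (ps.map Prod.fst)).contains p.1 = true :=
      List.contains_iff_mem.mpr ((PySem.Set.mem_ofList _ _).mpr hmem)
    simp only [PySem.Set.contains] at hc
    rw [if_pos hc]
    unfold pvGroup
    rw [PySem.List.dedup_eq_ofList, PySem.List.dedup_eq_ofList]
    have hd : PySem.Set.ofList ((ps ++ [p]).map Prod.fst) = PySem.Set.ofList (ps.map Prod.fst) := by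
      rw [List.map_append]
      show PySem.Set.ofList (ps.map Prod.fst ++ [p.1]) = _
      rw [ofList_append_singleton, if_pos hmem]
    rw [hd, List.map_map]
    apply List.map_congr_left
    intro h _
    show (if h == p.1 then (h, pvWordsOf ps h ++ [p.2]) else (h, pvWordsOf ps h))
        = (h, pvWordsOf (ps ++ [p]) h)
    rw [pvWordsOf_append_singleton]
    by_cases hh : h = p.1
    · simp [hh]
    · simp [hh, show ¬ p.1 = h from fun e => hh e.symm]
  · have hc : ¬ (PySem.Set.ofList (ps.map Prod.fst)).contains p.1 = true := by
      intro hcon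
      exact hmem ((PySem.Set.mem_ofList _ _).mp (List.contains_iff_mem.mp hcon))
    simp only [PySem.Set.contains] at hc
    rw [if_neg hc]
    unfold pvGroup
    rw [PySem.List.dedup_eq_ofList, PySem.List.dedup_eq_ofList]
    have hd : PySem.Set.ofList ((ps ++ [p]).map Prod.fst)
        = PySem.Set.ofList (ps.map Prod.fst) ++ [p.1] := by
      rw [List.map_append]
      show PySem.Set.ofList (ps.map Prod.fst ++ [p.1]) = _
      rw [ofList_append_singleton, if_neg hmem]
    rw [hd, List.map_append]
    congr 1
    · apply List.map_congr_left
      intro h hh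
      have hne : ¬ p.1 = h := by
        intro e
        exact hmem (e ▸ (PySem.Set.mem_ofList _ _).mp hh)
      simp [pvWordsOf_append_singleton, hne]
    · have hnil : pvWordsOf ps p.1 = [] := by
        unfold pvWordsOf
        have hf : ps.filter (fun q => q.1 == p.1) = [] := by
          rw [List.filter_eq_nil_iff]
          intro q hq
          simp only [beq_iff_eq]
          intro e
          exact hmem (e ▸ List.mem_map_of_mem hq)
        rw [hf]
        rfl
      show [(p.1, [p.2])] = [(p.1, pvWordsOf (ps ++ [p]) p.1)]
      rw [pvWordsOf_append_singleton, hnil, if_pos rfl]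
      rfl

theorem pvGroup_nil : pvGroup [] = [] := by
  simp [pvGroup]

theorem foldl_pvAdd (ps qs : List (String × String)) :
    ps.foldl pvAdd (pvGroup qs) = pvGroup (qs ++ ps) := by
  induction ps generalizing qs with
  | nil => rw [List.foldl_nil, List.append_nil]
  | cons p ps ih =>
    rw [List.foldl_cons, pvAdd_pvGroup, ih, List.append_assoc]
    rfl

-- ===== VERDICT (by name: the statement is the Claim_ definition above) =====
theorem create_chain_for_trigram_spec : Claim_equal_create_chain_for_trigram := by
  intro t_list _ _
  show create_chain_for_trigram t_list = create_chain_for_trigram_alt t_list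
  unfold create_chain_for_trigram
  rw [foldl_stepA, ← pvGroup_nil, foldl_pvAdd, List.nil_append]
  rfl
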